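-- pv_equiv track=rewrite | github.com/MarsPain/efficiency_skills | arxiv-deep-research/scripts/compose_research_export.py | _strip_bibtex_sections
-- ===== SOURCE A (Python) =====
-- def _strip_bibtex_sections(text: str) -> str:
--     lines = text.splitlines()
--     kept: list[str] = []
--     skipping = False
--
--     for line in lines:
--         if line.strip().lower() == "## bibtex":
--             skipping = True
--             continue
--         if skipping and line.startswith("## "):
--             skipping = False
--         if not skipping:
--             kept.append(line)
--
--     return "\n".join(kept).strip()
-- ===== SOURCE B (Python) =====
-- def _strip_bibtex_sections(text: str) -> str:
--     lines = text.splitlines()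
--     # Stage 1: split the lines into segments at the bibtex trigger lines
--     # (the triggers themselves are removed by the split).
--     done = []
--     cur = []
--     for line in lines:
--         if line.strip().lower() == "## bibtex":
--             done.append(cur)
--             cur = []
--         else:
--             cur.append(line)
--     segments = done + [cur]
--     # Stage 2: the first segment (before any trigger) is kept whole; every
--     # later segment loses its prefix up to the first raw '## ' header line.
--     kept = list(segments[0])
--     for seg in segments[1:]:
--         k = 0
--         while k < len(seg) and not seg[k].startswith("## "):
--             k += 1
--         kept.extend(seg[k:])
--     return "\n".join(kept).strip()
-- ===== Notes on version B (the rewrite author's own statement) =====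
-- stated objective: alternative
-- what changed: Two staged passes instead of a stateful scan: first split the line list into segments at the bibtex trigger lines, then keep the first segment whole and strip from every later segment its prefix up to the first raw '## ' header, no skipping flag threaded through the lines.
import Mathlib
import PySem

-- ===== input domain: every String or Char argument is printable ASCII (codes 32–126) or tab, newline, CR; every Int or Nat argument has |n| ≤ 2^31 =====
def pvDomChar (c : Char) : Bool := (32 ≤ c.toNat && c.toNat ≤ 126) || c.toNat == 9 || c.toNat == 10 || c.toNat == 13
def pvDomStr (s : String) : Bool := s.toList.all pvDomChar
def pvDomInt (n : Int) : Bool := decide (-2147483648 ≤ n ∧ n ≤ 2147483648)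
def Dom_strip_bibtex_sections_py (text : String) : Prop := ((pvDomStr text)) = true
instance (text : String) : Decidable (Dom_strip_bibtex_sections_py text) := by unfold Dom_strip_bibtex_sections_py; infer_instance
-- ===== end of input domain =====

-- B replaces A's stateful flag scan by two staged passes: split the lines into
-- segments at bibtex trigger lines, then drop each later segment's prefix up to
-- the first raw '## ' header (alternative decomposition, same cost).

-- shared line predicates (each port applies them exactly as its Python does)
def pvTrig (line : String) : Bool := PySem.Str.lower (PySem.Str.strip line) == "## bibtex"
def pvHdr (line : String) : Bool := PySem.Str.startswith line "## "

-- ===== PORT A =====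
-- A's loop body: state (kept, skipping)
def pvAStep (st : List String × Bool) (line : String) : List String × Bool :=
  if pvTrig line then (st.1, true)
  else
    let skipping := if st.2 && pvHdr line then false else st.2
    if !skipping then (st.1 ++ [line], skipping) else (st.1, skipping)

def strip_bibtex_sections_py (text : String) : String :=
  let lines := PySem.Str.splitlines text
  let st := lines.foldl pvAStep ([], false)
  PySem.Str.strip (PySem.Str.join "\n" st.1)

-- ===== PORT B =====
-- stage-1 loop body: state (done segments, current segment)
def pvSplitStep (st : List (List String) × List String) (line : String) :
    List (List String) × List String :=
  if pvTrig line then (st.1 ++ [st.2], []) else (st.1, st.2 ++ [line])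

-- Source B's inner index loop 'k' followed by 'seg[k:]': drop the non-header prefix
def pvDropPre (seg : List String) : List String := seg.dropWhile (fun l => !pvHdr l)

def strip_bibtex_sections_py_alt (text : String) : String :=
  let lines := PySem.Str.splitlines text
  let st := lines.foldl pvSplitStep ([], [])
  let segments := st.1 ++ [st.2]
  let kept := segments.tail.foldl (fun acc seg => acc ++ pvDropPre seg) (segments.headD [])
  PySem.Str.strip (PySem.Str.join "\n" kept)

-- ===== PRECONDITION & SPEC =====
def Spec_strip_bibtex_sections_py (text : String) (out : String) : Prop := out = strip_bibtex_sections_py_alt text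
instance (text : String) (out : String) : Decidable (Spec_strip_bibtex_sections_py text out) := by unfold Spec_strip_bibtex_sections_py; infer_instance

-- ===== CLAIM (what is proved, stated in full; the proofs are below) =====
def Claim_equal_strip_bibtex_sections_py : Prop := ∀ (text : String), Dom_strip_bibtex_sections_py text → Spec_strip_bibtex_sections_py text (strip_bibtex_sections_py text)

-- ===== LEMMAS AND PROOFS =====
-- the lines A has kept, expressed over B's split state (done segments, current segment)
def pvKeptRep : List (List String) → List String → List String
  | [], cur => cur
  | d :: ds, cur => d ++ ds.flatMap pvDropPre ++ pvDropPre cur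

theorem pvDropPre_nil_of_all (cur : List String)
    (h : cur.all (fun x => !pvHdr x) = true) : pvDropPre cur = [] := by
  simp only [pvDropPre, List.dropWhile_eq_nil_iff]
  intro x hx
  simpa using List.all_eq_true.mp h x hx

theorem pvDropPre_append_all (cur : List String) (l : String) :
    cur.all (fun x => !pvHdr x) = true → pvDropPre (cur ++ [l]) = pvDropPre [l] := by
  induction cur with
  | nil => intro _; rfl
  | cons c cs ih =>
    intro h
    rw [List.all_cons, Bool.and_eq_true] at h
    have hc : (!pvHdr c) = true := h.1
    calc pvDropPre ((c :: cs) ++ [l]) = pvDropPre (cs ++ [l]) := by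
          simp [pvDropPre, hc]
      _ = pvDropPre [l] := ih h.2

theorem pvDropPre_append_not_all (cur : List String) (xs : List String) :
    cur.all (fun x => !pvHdr x) = false → pvDropPre (cur ++ xs) = pvDropPre cur ++ xs := by
  induction cur with
  | nil => intro h; simp at h
  | cons c cs ih =>
    intro h
    by_cases hc : pvHdr c
    · simp [pvDropPre, List.dropWhile, hc]
    · have hcs : cs.all (fun x => !pvHdr x) = false := by
        rw [List.all_cons] at h; simpa [hc] using h
      simp only [List.cons_append, pvDropPre, List.dropWhile, hc] at ih ⊢
      simpa using ih hcs

theorem pvMain (ls : List String) : ∀ (done : List (List String)) (cur : List String),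
    (List.foldl pvAStep (pvKeptRep done cur, decide (done ≠ []) && cur.all (fun x => !pvHdr x)) ls).1 =
      (let st := List.foldl pvSplitStep (done, cur) ls; pvKeptRep st.1 st.2) := by
  induction ls with
  | nil => intro done cur; rfl
  | cons l ls ih =>
    intro done cur
    simp only [List.foldl, pvAStep, pvSplitStep]
    by_cases ht : pvTrig l
    · simp only [ht, if_pos]
      have h1 : pvKeptRep done cur = pvKeptRep (done ++ [cur]) [] := by
        cases done with
        | nil => simp [pvKeptRep, pvDropPre]
        | cons d ds => simp [pvKeptRep, pvDropPre]
      have h2 : (true : Bool) = (decide ((done ++ [cur]) ≠ []) && ([] : List String).all (fun x => !pvHdr x)) := by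
        simp
      rw [h1, h2, ih]
    · simp only [ht, if_neg, Bool.false_eq_true, not_false_eq_true]
      cases done with
      | nil =>
        have heq : pvKeptRep [] cur ++ [l] = pvKeptRep [] (cur ++ [l]) := by simp [pvKeptRep]
        simpa [heq] using ih [] (cur ++ [l])
      | cons d ds =>
        by_cases hall : cur.all (fun x => !pvHdr x)
        · by_cases hh : pvHdr l
          · have hk : pvKeptRep (d :: ds) cur ++ [l] = pvKeptRep (d :: ds) (cur ++ [l]) := by
              have h1 : pvDropPre cur = [] := pvDropPre_nil_of_all cur hall
              have h2 : pvDropPre (cur ++ [l]) = [l] := by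
                rw [pvDropPre_append_all cur l hall]; simp [pvDropPre, List.dropWhile, hh]
              simp [pvKeptRep, h1, h2]
            simpa [hall, hh, hk] using ih (d :: ds) (cur ++ [l])
          · have hk : pvKeptRep (d :: ds) cur = pvKeptRep (d :: ds) (cur ++ [l]) := by
              have h1 : pvDropPre (cur ++ [l]) = pvDropPre cur := by
                rw [pvDropPre_append_all cur l hall, pvDropPre_nil_of_all cur hall]
                simp [pvDropPre, List.dropWhile, hh]
              simp [pvKeptRep, h1]
            simpa [hall, hh, hk] using ih (d :: ds) (cur ++ [l])
        · have hall' : cur.all (fun x => !pvHdr x) = false := by simpa using hall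
          have hk : pvKeptRep (d :: ds) cur ++ [l] = pvKeptRep (d :: ds) (cur ++ [l]) := by
            simp [pvKeptRep, pvDropPre_append_not_all cur [l] hall']
          have hall2 : (cur ++ [l]).all (fun x => !pvHdr x) = false := by
            simp [List.all_append, hall']
          simpa [hall', hall2, hk] using ih (d :: ds) (cur ++ [l])

theorem pvMain0 (ls : List String) :
    (List.foldl pvAStep ([], false) ls).1 =
      (let st := List.foldl pvSplitStep (([] : List (List String)), ([] : List String)) ls;
        pvKeptRep st.1 st.2) := by
  simpa [pvKeptRep] using pvMain ls [] []

-- ===== VERDICT (by name: the statement is the Claim_ definition above) =====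
theorem strip_bibtex_sections_py_spec : Claim_equal_strip_bibtex_sections_py := by
  intro text _
  unfold Spec_strip_bibtex_sections_py strip_bibtex_sections_py strip_bibtex_sections_py_alt
  simp only [pvMain0]
  rcases hst : List.foldl pvSplitStep ([], []) (PySem.Str.splitlines text) with ⟨done, cur⟩
  cases done with
  | nil => simp [pvKeptRep]
  | cons d ds => simp [pvKeptRep, List.flatMap, List.append_assoc]
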